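-- pv_equiv track=rewrite | github.com/thedamdocta/credit-report-highlighter | test_real_analysis_highlighting.py | find_text_coordinates
-- ===== SOURCE A (Python) =====
-- def find_text_coordinates(page, search_text):
--     """Find approximate coordinates for text on the page"""
--     if not search_text or len(search_text.strip()) < 3:
--         return {'x': 100, 'y': 200, 'width': 300, 'height': 20}
--
--     # Simple coordinate estimation based on text position
--     lines = page['text'].split('\n')
--     for idx, line in enumerate(lines):
--         if search_text.strip() in line:
--             # Estimate position based on line number and text position
--             y = 50 + (idx * 15)  # Rough line height estimation
--             x = 50 + (line.find(search_text.strip()) * 8)  # Rough character width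
--             width = len(search_text.strip()) * 8
--             height = 15
--
--             return {
--                 'x': max(0, x),
--                 'y': max(0, y),
--                 'width': min(width, 500),
--                 'height': height
--             }
--
--     # Default fallback coordinates
--     return {'x': 100, 'y': 200, 'width': 300, 'height': 20}
-- ===== SOURCE B (Python) =====
-- def find_text_coordinates(page, search_text):
--     """Find approximate coordinates for text on the page (one global find, no per-line loop)"""
--     st = search_text.strip() if search_text else ''
--     if len(st) < 3:
--         return {'x': 100, 'y': 200, 'width': 300, 'height': 20}
--
--     text = page['text']
--     pos = text.find(st)
--     if pos == -1 or '\n' in st: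
--         # not on the page, or st spans lines (a single line can never contain it)
--         return {'x': 100, 'y': 200, 'width': 300, 'height': 20}
--
--     pre = text[:pos]
--     idx = pre.count('\n')              # line number of the match
--     nl = pre.rfind('\n')               # index just before the start of that line
--     col = pos - nl - 1                 # column of the match within its line
--     return {
--         'x': max(0, 50 + col * 8),
--         'y': max(0, 50 + idx * 15),
--         'width': min(len(st) * 8, 500),
--         'height': 15,
--     }
-- ===== Notes on version B (the rewrite author's own statement) =====
-- stated objective: alternative
-- what changed: Replaces the split-into-lines loop (with a per-line substring scan) by a single global text.find of the stripped needle, deriving the line number and column arithmetically from a newline count and rfind over the prefix before the match.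
import Mathlib
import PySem

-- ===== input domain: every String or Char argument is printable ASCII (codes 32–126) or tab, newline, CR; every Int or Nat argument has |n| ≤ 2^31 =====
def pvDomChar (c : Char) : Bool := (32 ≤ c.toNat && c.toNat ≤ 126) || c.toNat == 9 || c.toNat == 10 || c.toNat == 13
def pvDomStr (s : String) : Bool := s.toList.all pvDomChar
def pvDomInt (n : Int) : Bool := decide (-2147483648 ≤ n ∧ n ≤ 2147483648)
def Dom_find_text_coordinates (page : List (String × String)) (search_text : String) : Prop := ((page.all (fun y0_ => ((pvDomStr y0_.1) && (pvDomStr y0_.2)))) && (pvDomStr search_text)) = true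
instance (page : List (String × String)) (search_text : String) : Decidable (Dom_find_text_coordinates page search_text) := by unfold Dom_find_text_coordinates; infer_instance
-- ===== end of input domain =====

-- B replaces A's split-into-lines loop by one global find plus newline count / rfind arithmetic on the
-- prefix before the match (an alternative decomposition; not claimed faster).

-- ===== PORT A =====
-- the 'for idx, line in enumerate(lines)' loop with its early return
def loopA (st : List Char) : List (List Char) → Nat → Option (List (String × Int))
  | [], _ => none
  | line :: rest, idx =>
    if PySem.Chars.isIn st line then
      some [("x", max 0 (50 + PySem.Chars.find line st * 8)),
            ("y", max 0 (50 + (idx : Int) * 15)),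
            ("width", min ((st.length : Int) * 8) 500),
            ("height", 15)]
    else loopA st rest (idx + 1)

def find_text_coordinates (page : List (String × String)) (search_text : String) : List (String × Int) :=
  if search_text == "" || decide ((PySem.Chars.strip search_text.toList).length < 3) then
    [("x", 100), ("y", 200), ("width", 300), ("height", 20)]
  else
    let lines := PySem.Chars.splitOn (PySem.Dict.getD (PySem.Dict.ofList page) "text" "").toList ['\n']
    match loopA (PySem.Chars.strip search_text.toList) lines 0 with
    | some d => d
    | none => [("x", 100), ("y", 200), ("width", 300), ("height", 20)]

-- ===== PORT B =====
def find_text_coordinates_alt (page : List (String × String)) (search_text : String) : List (String × Int) :=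
  let st := PySem.Chars.strip search_text.toList
  if st.length < 3 then
    [("x", 100), ("y", 200), ("width", 300), ("height", 20)]
  else
    let text := (PySem.Dict.getD (PySem.Dict.ofList page) "text" "").toList
    let pos := PySem.Chars.find text st
    if pos == -1 || PySem.Chars.isIn ['\n'] st then
      [("x", 100), ("y", 200), ("width", 300), ("height", 20)]
    else
      let pre := PySem.List.slice text none (some pos)
      let idx : Int := (PySem.Chars.count pre ['\n'] : Int)
      let nl := PySem.Chars.rfind pre ['\n']
      let col := pos - nl - 1
      [("x", max 0 (50 + col * 8)),
       ("y", max 0 (50 + idx * 15)),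
       ("width", min ((st.length : Int) * 8) 500),
       ("height", 15)]

-- ===== PRECONDITION & SPEC =====
-- Pre_ excludes only inputs where the Python A raises: a page dict lacking the 'text' key while the
-- short-needle guard does not fire (KeyError; Python B raises identically there).
def Pre_find_text_coordinates (page : List (String × String)) (search_text : String) : Prop :=
  (PySem.Chars.strip search_text.toList).length < 3 ∨ PySem.Dict.contains (PySem.Dict.ofList page) "text" = true
instance (page : List (String × String)) (search_text : String) : Decidable (Pre_find_text_coordinates page search_text) := by unfold Pre_find_text_coordinates; infer_instance
def pvWitness_find_text_coordinates : (List (String × String)) × String := ([("text", "hello\nbig world")], "world")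

def Spec_find_text_coordinates (page : List (String × String)) (search_text : String) (out : List (String × Int)) : Prop := out = find_text_coordinates_alt page search_text
instance (page : List (String × String)) (search_text : String) (out : List (String × Int)) : Decidable (Spec_find_text_coordinates page search_text out) := by unfold Spec_find_text_coordinates; infer_instance

-- ===== CLAIM (what is proved, stated in full; the proofs are below) =====
def Claim_equal_find_text_coordinates : Prop := ∀ (page : List (String × String)) (search_text : String), Dom_find_text_coordinates page search_text → Pre_find_text_coordinates page search_text → Spec_find_text_coordinates page search_text (find_text_coordinates page search_text)

-- ===== LEMMAS AND PROOFS =====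

-- structural model of text.split('\n')
def modHead (c : Char) : List (List Char) → List (List Char)
  | [] => [[c]]
  | l :: ls => (c :: l) :: ls

def lines1 : List Char → List (List Char)
  | [] => [[]]
  | c :: r => if c = '\n' then [] :: lines1 r else modHead c (lines1 r)

def withHead (pre : List Char) : List (List Char) → List (List Char)
  | [] => [pre]
  | l :: ls => (pre ++ l) :: ls

-- first matching line: (line index, column of the match in that line)
def firstHit (st : List Char) : List (List Char) → Option (Nat × Int)
  | [] => none
  | line :: rest =>
    if PySem.Chars.isIn st line then some (0, PySem.Chars.find line st)
    else (firstHit st rest).map (fun p => (p.1 + 1, p.2))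

-- B's arithmetic core
def bCore (st t : List Char) : Option (Nat × Int) :=
  let pos := PySem.Chars.find t st
  if pos = -1 then none
  else
    let pre := t.take pos.toNat
    some (pre.count '\n', pos - PySem.Chars.rfind pre ['\n'] - 1)

lemma bCore_eq_none {st t : List Char} (h : PySem.Chars.find t st = -1) : bCore st t = none := by
  simp [bCore, h]

lemma bCore_eq_some {st t : List Char} (h : PySem.Chars.find t st ≠ -1) :
    bCore st t = some ((t.take (PySem.Chars.find t st).toNat).count '\n',
      PySem.Chars.find t st
        - PySem.Chars.rfind (t.take (PySem.Chars.find t st).toNat) ['\n'] - 1) := by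
  simp [bCore, h]

lemma lines1_ne_nil (t : List Char) : lines1 t ≠ [] := by
  induction t with
  | nil => simp [lines1]
  | cons c r ih =>
    simp only [lines1]
    split
    · simp
    · cases h : lines1 r <;> simp [modHead]

lemma withHead_nil_of_ne_nil {xs : List (List Char)} (h : xs ≠ []) : withHead [] xs = xs := by
  cases xs with
  | nil => exact absurd rfl h
  | cons l ls => simp [withHead]

lemma withHead_modHead (pre : List Char) (c : Char) (xs : List (List Char)) :
    withHead pre (modHead c xs) = withHead (pre ++ [c]) xs := by
  cases xs <;> simp [withHead, modHead]

lemma isPrefixOf_single_iff (l : List Char) :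
    ['\n'].isPrefixOf l = true ↔ ∃ r, l = '\n' :: r := by
  rw [List.isPrefixOf_iff_prefix]
  constructor
  · rintro ⟨r, hr⟩
    exact ⟨r, hr.symm⟩
  · rintro ⟨r, rfl⟩
    exact ⟨r, rfl⟩

lemma splitOn_go_eq : ∀ (fuel : Nat) (l cur : List Char) (acc : List (List Char)), l.length ≤ fuel →
    PySem.Chars.splitOn.go ['\n'] fuel l cur acc =
      acc.reverse ++ withHead cur.reverse (lines1 l) := by
  intro fuel
  induction fuel with
  | zero =>
    intro l cur acc hl
    have hnil : l = [] := List.eq_nil_of_length_eq_zero (Nat.le_zero.mp hl)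
    subst hnil
    simp [PySem.Chars.splitOn.go, lines1, withHead]
  | succ n ih =>
    intro l cur acc hl
    cases l with
    | nil => simp [PySem.Chars.splitOn.go, lines1, withHead]
    | cons c rest =>
      simp only [PySem.Chars.splitOn.go]
      by_cases hc : c = '\n'
      · subst hc
        rw [if_pos ((isPrefixOf_single_iff _).mpr ⟨rest, rfl⟩)]
        have hrec := ih rest [] (cur.reverse :: acc) (by simp at hl; omega)
        simp only [List.length_singleton, List.drop_succ_cons, List.drop_zero]
        rw [hrec]
        have h1 : withHead (([] : List Char)).reverse (lines1 rest) = lines1 rest := by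
          rw [List.reverse_nil]
          exact withHead_nil_of_ne_nil (lines1_ne_nil rest)
        rw [h1]
        simp [lines1, withHead]
      · have hpre : ¬ ['\n'].isPrefixOf (c :: rest) = true := by
          intro h
          obtain ⟨r', hr⟩ := (isPrefixOf_single_iff _).mp h
          exact hc (by injection hr)
        rw [if_neg hpre]
        rw [ih rest (c :: cur) acc (by simp at hl; omega)]
        simp [lines1, hc, withHead_modHead]

lemma splitOn_eq_lines1 (t : List Char) : PySem.Chars.splitOn t ['\n'] = lines1 t := by
  show PySem.Chars.splitOn.go ['\n'] (t.length + 1) t [] [] = lines1 t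
  rw [splitOn_go_eq (t.length + 1) t [] [] (by omega)]
  simpa using withHead_nil_of_ne_nil (lines1_ne_nil t)

lemma lines1_no_nl {t : List Char} (h : '\n' ∉ t) : lines1 t = [t] := by
  induction t with
  | nil => simp [lines1]
  | cons c r ih =>
    have hc : c ≠ '\n' := fun hc => h (by simp [hc])
    have hr : '\n' ∉ r := fun hr => h (by simp [hr])
    simp [lines1, hc, ih hr, modHead]

lemma lines1_append {u v : List Char} (h : '\n' ∉ u) :
    lines1 (u ++ '\n' :: v) = u :: lines1 v := by
  induction u with
  | nil => simp [lines1]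
  | cons c u' ih =>
    have hc : c ≠ '\n' := fun hc => h (by simp [hc])
    have hu : '\n' ∉ u' := fun hr => h (by simp [hr])
    simp only [List.cons_append, lines1, if_neg hc, ih hu, modHead]

lemma mem_lines1_no_nl {t l : List Char} (h : l ∈ lines1 t) : '\n' ∉ l := by
  induction t generalizing l with
  | nil => simp [lines1] at h; simp [h]
  | cons c r ih =>
    by_cases hc : c = '\n'
    · simp only [lines1, if_pos hc] at h
      rcases List.mem_cons.mp h with h | h
      · simp [h]
      · exact ih h
    · simp only [lines1, if_neg hc] at h
      cases hr : lines1 r with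
      | nil => exact absurd hr (lines1_ne_nil r)
      | cons l0 ls =>
        rw [hr] at h
        simp only [modHead] at h
        rcases List.mem_cons.mp h with h | h
        · subst h
          intro hm
          rcases List.mem_cons.mp hm with hm | hm
          · exact hc hm.symm
          · exact ih (l := l0) (by rw [hr]; exact List.mem_cons_self ..) hm
        · exact ih (by rw [hr]; exact List.mem_cons_of_mem _ h)

lemma count_go_eq : ∀ (fuel : Nat) (l : List Char) (acc : Nat), l.length ≤ fuel →
    PySem.Chars.count.go ['\n'] fuel l acc = acc + l.count '\n' := by
  intro fuel
  induction fuel with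
  | zero =>
    intro l acc hl
    have hnil : l = [] := List.eq_nil_of_length_eq_zero (Nat.le_zero.mp hl)
    subst hnil
    simp [PySem.Chars.count.go]
  | succ n ih =>
    intro l acc hl
    cases l with
    | nil => simp [PySem.Chars.count.go]
    | cons c rest =>
      simp only [PySem.Chars.count.go]
      by_cases hc : c = '\n'
      · subst hc
        rw [if_pos ((isPrefixOf_single_iff _).mpr ⟨rest, rfl⟩)]
        simp only [List.length_singleton, List.drop_succ_cons, List.drop_zero]
        rw [ih rest (acc + 1) (by simp at hl; omega)]
        simp [List.count_cons]
        omega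
      · have hpre : ¬ ['\n'].isPrefixOf (c :: rest) = true := by
          intro h
          obtain ⟨r', hr⟩ := (isPrefixOf_single_iff _).mp h
          exact hc (by injection hr)
        rw [if_neg hpre]
        rw [ih rest acc (by simp at hl; omega)]
        simp [List.count_cons, hc]

lemma count_single (s : List Char) : PySem.Chars.count s ['\n'] = s.count '\n' := by
  show (if (['\n'] : List Char).isEmpty = true then s.length + 1
        else PySem.Chars.count.go ['\n'] s.length s 0) = _
  rw [if_neg (by simp)]
  simpa using count_go_eq s.length s 0 le_rfl

lemma rfind_go_no_nl {s : List Char} (h : '\n' ∉ s) :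
    ∀ j, PySem.Chars.rfind.go s ['\n'] j = -1 := by
  intro j
  induction j with
  | zero =>
    have h' : ¬ ['\n'].isPrefixOf s = true := by
      intro hp
      obtain ⟨r, hr⟩ := (isPrefixOf_single_iff _).mp hp
      exact h (by rw [hr]; simp)
    simp only [PySem.Chars.rfind.go, if_neg h']
  | succ j ih =>
    have h' : ¬ ['\n'].isPrefixOf (s.drop (j + 1)) = true := by
      intro hp
      obtain ⟨r, hr⟩ := (isPrefixOf_single_iff _).mp hp
      exact h (List.mem_of_mem_drop (by rw [hr]; simp : ('\n' : Char) ∈ s.drop (j + 1)))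
    simp only [PySem.Chars.rfind.go, if_neg h']
    exact ih

lemma rfind_no_nl {s : List Char} (h : '\n' ∉ s) : PySem.Chars.rfind s ['\n'] = -1 := by
  show PySem.Chars.rfind.go s ['\n'] s.length = -1
  exact rfind_go_no_nl h _

lemma drop_mid (u w : List Char) (j : Nat) :
    (u ++ '\n' :: w).drop (u.length + 1 + j) = w.drop j := by
  rw [List.drop_append]
  have h1 : List.drop (u.length + 1 + j) u = [] := List.drop_eq_nil_of_le (by omega)
  have h2 : u.length + 1 + j - u.length = j + 1 := by omega
  rw [h1, h2, List.drop_succ_cons, List.nil_append]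

lemma rfind_go_append (u w : List Char) :
    ∀ j, PySem.Chars.rfind.go (u ++ '\n' :: w) ['\n'] (u.length + 1 + j) =
      if PySem.Chars.rfind.go w ['\n'] j = -1 then (u.length : Int)
      else (u.length : Int) + 1 + PySem.Chars.rfind.go w ['\n'] j := by
  have hmid : PySem.Chars.rfind.go (u ++ '\n' :: w) ['\n'] u.length = (u.length : Int) := by
    cases u with
    | nil =>
      simp only [List.length_nil, List.nil_append]
      simp only [PySem.Chars.rfind.go]
      rw [if_pos ((isPrefixOf_single_iff _).mpr ⟨w, rfl⟩)]
      rfl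
    | cons c u' =>
      have hlen : (c :: u').length = u'.length + 1 := rfl
      rw [hlen]
      have hdk : ((c :: u') ++ '\n' :: w).drop (u'.length + 1) = '\n' :: w := by
        rw [List.cons_append, List.drop_succ_cons, List.drop_left]
      simp only [PySem.Chars.rfind.go]
      rw [hdk, if_pos ((isPrefixOf_single_iff _).mpr ⟨w, rfl⟩)]
  intro j
  induction j with
  | zero =>
    rw [Nat.add_zero]
    have hdrop : (u ++ '\n' :: w).drop (u.length + 1) = w := by
      simpa using drop_mid u w 0
    have hL : PySem.Chars.rfind.go (u ++ '\n' :: w) ['\n'] (u.length + 1)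
        = if ['\n'].isPrefixOf w = true then ((u.length + 1 : Nat) : Int)
          else PySem.Chars.rfind.go (u ++ '\n' :: w) ['\n'] u.length := by
      simp only [PySem.Chars.rfind.go]
      rw [hdrop]
    by_cases hw : ['\n'].isPrefixOf w = true
    · have hR : PySem.Chars.rfind.go w ['\n'] 0 = 0 := by
        simp only [PySem.Chars.rfind.go]
        rw [if_pos hw]
      rw [hL, if_pos hw, hR, if_neg (by omega)]
      push_cast
      ring
    · have hR : PySem.Chars.rfind.go w ['\n'] 0 = -1 := by
        simp only [PySem.Chars.rfind.go]
        rw [if_neg hw]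
      rw [hL, if_neg hw, hR, if_pos rfl]
      exact hmid
  | succ j ih =>
    have hidx : u.length + 1 + (j + 1) = (u.length + 1 + j) + 1 := by omega
    rw [hidx]
    have hdrop : (u ++ '\n' :: w).drop (u.length + 1 + j + 1) = w.drop (j + 1) := by
      have e : u.length + 1 + j + 1 = u.length + 1 + (j + 1) := by omega
      rw [e, drop_mid u w (j + 1)]
    by_cases hw : ['\n'].isPrefixOf (w.drop (j + 1)) = true
    · have hR : PySem.Chars.rfind.go w ['\n'] (j + 1) = ((j + 1 : Nat) : Int) := by
        simp only [PySem.Chars.rfind.go]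
        rw [if_pos hw]
      rw [hR, if_neg (by omega)]
      simp only [PySem.Chars.rfind.go]
      rw [hdrop, if_pos hw]
      push_cast
      ring
    · have hR : PySem.Chars.rfind.go w ['\n'] (j + 1) = PySem.Chars.rfind.go w ['\n'] j := by
        simp only [PySem.Chars.rfind.go]
        rw [if_neg hw]
      rw [hR]
      simp only [PySem.Chars.rfind.go]
      rw [hdrop, if_neg hw]
      exact ih

lemma rfind_append (u w : List Char) :
    PySem.Chars.rfind (u ++ '\n' :: w) ['\n'] =
      if PySem.Chars.rfind w ['\n'] = -1 then (u.length : Int)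
      else (u.length : Int) + 1 + PySem.Chars.rfind w ['\n'] := by
  have h0 : PySem.Chars.rfind (u ++ '\n' :: w) ['\n']
      = PySem.Chars.rfind.go (u ++ '\n' :: w) ['\n'] ((u ++ '\n' :: w).length) := rfl
  have hlen : (u ++ '\n' :: w).length = u.length + 1 + w.length := by
    rw [List.length_append, List.length_cons]
    omega
  rw [h0, hlen, rfind_go_append u w w.length]
  rfl

lemma find_eq_coe {t st : List Char} (p : Nat) (h1 : st <+: t.drop p)
    (h2 : ∀ i < p, ¬ st <+: t.drop i) : PySem.Chars.find t st = (p : Int) := by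
  have hin : PySem.Chars.isIn st t = true :=
    (PySem.Chars.exists_prefix_drop_iff_isIn _ _).mp ⟨p, h1⟩
  have hne : PySem.Chars.find t st ≠ -1 := by
    rw [PySem.Chars.find_ne_neg_one_iff]
    exact (PySem.Chars.isIn_iff_infix _ _).mp hin
  have hnonneg : 0 ≤ PySem.Chars.find t st := by
    have := PySem.Chars.neg_one_le_find t st
    omega
  obtain ⟨hpre, hmin⟩ := PySem.Chars.find_spec hnonneg
  have htn : (PySem.Chars.find t st).toNat = p := by
    rcases Nat.lt_trichotomy (PySem.Chars.find t st).toNat p with h | h | h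
    · exact absurd hpre (h2 _ h)
    · exact h
    · exact absurd h1 (hmin p h)
  omega

lemma occ_left {u v st : List Char} (hnl : '\n' ∉ st) {i : Nat} (hi : i ≤ u.length) :
    st <+: (u ++ '\n' :: v).drop i ↔ st <+: u.drop i := by
  have hdrop : (u ++ '\n' :: v).drop i = u.drop i ++ '\n' :: v :=
    List.drop_append_of_le_length hi
  rw [hdrop]
  constructor
  · intro h
    by_cases hlen : st.length ≤ (u.drop i).length
    · have heq : st = (u.drop i ++ '\n' :: v).take st.length := List.prefix_iff_eq_take.mp h
      rw [List.take_append_of_le_length hlen] at heq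
      rw [heq]
      exact List.take_prefix _ _
    · exfalso
      push_neg at hlen
      have hlt : (u.drop i).length < (u.drop i ++ '\n' :: v).length := by simp
      have hget := h.getElem (i := (u.drop i).length) hlen
      have hval : (u.drop i ++ '\n' :: v)[(u.drop i).length]'hlt = '\n' := by simp
      have hmem : ('\n' : Char) ∈ st := by
        rw [← hget.trans hval]
        exact List.getElem_mem _
      exact hnl hmem
  · intro h
    exact h.trans (List.prefix_append _ _)

lemma no_occ_of_find_neg {s st : List Char} (h : PySem.Chars.find s st = -1) :
    ∀ i, ¬ st <+: s.drop i := by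
  intro i hocc
  have hin : PySem.Chars.isIn st s = true :=
    (PySem.Chars.exists_prefix_drop_iff_isIn _ _).mp ⟨i, hocc⟩
  rw [PySem.Chars.isIn_iff_infix] at hin
  rw [PySem.Chars.find_eq_neg_one_iff] at h
  exact h hin

lemma find_nonneg_prefix {s st : List Char} (h : PySem.Chars.find s st ≠ -1) :
    st <+: s.drop (PySem.Chars.find s st).toNat ∧
      ∀ i < (PySem.Chars.find s st).toNat, ¬ st <+: s.drop i := by
  have hnonneg : 0 ≤ PySem.Chars.find s st := by
    have := PySem.Chars.neg_one_le_find s st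
    omega
  exact PySem.Chars.find_spec hnonneg

lemma find_split {u v st : List Char} (hst : st ≠ []) (hnl : '\n' ∉ st) :
    PySem.Chars.find (u ++ '\n' :: v) st =
      if PySem.Chars.find u st = -1 then
        (if PySem.Chars.find v st = -1 then -1
         else (u.length : Int) + 1 + PySem.Chars.find v st)
      else PySem.Chars.find u st := by
  by_cases hu : PySem.Chars.find u st = -1
  · rw [if_pos hu]
    by_cases hv : PySem.Chars.find v st = -1
    · rw [if_pos hv, PySem.Chars.find_eq_neg_one_iff]
      intro hinf
      have hin : PySem.Chars.isIn st (u ++ '\n' :: v) = true :=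
        (PySem.Chars.isIn_iff_infix _ _).mpr hinf
      obtain ⟨i, hocc⟩ := (PySem.Chars.exists_prefix_drop_iff_isIn _ _).mpr hin
      by_cases hi : i ≤ u.length
      · exact no_occ_of_find_neg hu i ((occ_left hnl hi).mp hocc)
      · push_neg at hi
        have heq : i = u.length + 1 + (i - u.length - 1) := by omega
        rw [heq, drop_mid] at hocc
        exact no_occ_of_find_neg hv _ hocc
    · rw [if_neg hv]
      obtain ⟨hpre, hmin⟩ := find_nonneg_prefix hv
      have hnn : 0 ≤ PySem.Chars.find v st := by
        have := PySem.Chars.neg_one_le_find v st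
        omega
      have hall : PySem.Chars.find (u ++ '\n' :: v) st
          = ((u.length + 1 + (PySem.Chars.find v st).toNat : Nat) : Int) := by
        apply find_eq_coe
        · rw [drop_mid]
          exact hpre
        · intro i hi
          by_cases hile : i ≤ u.length
          · intro hocc
            exact no_occ_of_find_neg hu i ((occ_left hnl hile).mp hocc)
          · push_neg at hile
            have heq : i = u.length + 1 + (i - u.length - 1) := by omega
            rw [heq, drop_mid]
            exact hmin _ (by omega)
      rw [hall]
      push_cast
      rw [Int.toNat_of_nonneg hnn]
  · rw [if_neg hu]
    obtain ⟨hpre, hmin⟩ := find_nonneg_prefix hu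
    have hnn : 0 ≤ PySem.Chars.find u st := by
      have := PySem.Chars.neg_one_le_find u st
      omega
    have hple : (PySem.Chars.find u st).toNat ≤ u.length := by
      have := PySem.Chars.find_le_length u st
      omega
    have hall : PySem.Chars.find (u ++ '\n' :: v) st = (((PySem.Chars.find u st).toNat : Nat) : Int) := by
      apply find_eq_coe
      · exact (occ_left hnl hple).mpr hpre
      · intro i hi
        rw [occ_left hnl (by omega)]
        exact hmin i hi
    rw [hall, Int.toNat_of_nonneg hnn]

lemma isIn_iff_find_ne {st l : List Char} :
    PySem.Chars.isIn st l = true ↔ PySem.Chars.find l st ≠ -1 := by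
  rw [PySem.Chars.isIn_iff_infix, ← PySem.Chars.find_ne_neg_one_iff]

lemma split_first_nl {t : List Char} (h : '\n' ∈ t) :
    ∃ u v, t = u ++ '\n' :: v ∧ '\n' ∉ u := by
  induction t with
  | nil => cases h
  | cons c r ih =>
    by_cases hc : c = '\n'
    · exact ⟨[], r, by simp [hc], by simp⟩
    · have hr : '\n' ∈ r := by
        rcases List.mem_cons.mp h with h | h
        · exact absurd h.symm hc
        · exact h
      obtain ⟨u, v, h1, h2⟩ := ih hr
      refine ⟨c :: u, v, by simp [h1], ?_⟩
      intro hm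
      rcases List.mem_cons.mp hm with hm | hm
      · exact hc hm.symm
      · exact h2 hm

lemma main_lemma {st : List Char} (hst : st ≠ []) (hnl : '\n' ∉ st) (t : List Char) :
    firstHit st (lines1 t) = bCore st t := by
  have H : ∀ n (t : List Char), t.length ≤ n → firstHit st (lines1 t) = bCore st t := by
    intro n
    induction n with
    | zero =>
      intro t hlen
      have ht : t = [] := List.eq_nil_of_length_eq_zero (Nat.le_zero.mp hlen)
      subst ht
      have hfind : PySem.Chars.find ([] : List Char) st = -1 := by
        rw [PySem.Chars.find_eq_neg_one_iff]
        intro hinf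
        exact hst (List.eq_nil_of_infix_nil hinf)
      have hin : PySem.Chars.isIn st ([] : List Char) = false := by
        rw [Bool.eq_false_iff]
        intro h
        exact (isIn_iff_find_ne.mp h) hfind
      rw [bCore_eq_none hfind]
      simp [lines1, firstHit, hin]
    | succ n ih =>
      intro t hlen
      by_cases hmem : '\n' ∈ t
      · obtain ⟨u, v, rfl, hu⟩ := split_first_nl hmem
        rw [lines1_append hu]
        have hvlen : v.length ≤ n := by
          rw [List.length_append, List.length_cons] at hlen
          omega
        by_cases hinu : PySem.Chars.isIn st u = true
        · -- found in the first line
          have hufind : PySem.Chars.find u st ≠ -1 := isIn_iff_find_ne.mp hinu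
          have hnn : 0 ≤ PySem.Chars.find u st := by
            have := PySem.Chars.neg_one_le_find u st
            omega
          have hfs := find_split (u := u) (v := v) hst hnl
          rw [if_neg hufind] at hfs
          have hple : (PySem.Chars.find u st).toNat ≤ u.length := by
            have := PySem.Chars.find_le_length u st
            omega
          have hnp : '\n' ∉ u.take (PySem.Chars.find u st).toNat :=
            fun hmem' => hu (List.mem_of_mem_take hmem')
          rw [bCore_eq_some (by rw [hfs]; exact hufind), hfs,
            List.take_append_of_le_length hple, rfind_no_nl hnp,
            List.count_eq_zero.mpr hnp]
          simp only [firstHit]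
          rw [if_pos hinu]
          simp only [Option.some_inj, Prod.mk.injEq]
          exact ⟨trivial, by ring⟩
        · -- not in the first line: recurse on v
          have hufind : PySem.Chars.find u st = -1 := by
            by_contra hne
            exact hinu (isIn_iff_find_ne.mpr hne)
          have hfs := find_split (u := u) (v := v) hst hnl
          rw [if_pos hufind] at hfs
          simp only [firstHit]
          rw [if_neg hinu, ih v hvlen]
          by_cases hv : PySem.Chars.find v st = -1
          · rw [if_pos hv] at hfs
            rw [bCore_eq_none hv, bCore_eq_none hfs]
            rfl
          · rw [if_neg hv] at hfs
            have hqnn : 0 ≤ PySem.Chars.find v st := by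
              have := PySem.Chars.neg_one_le_find v st
              omega
            have htnn : PySem.Chars.find (u ++ '\n' :: v) st ≠ -1 := by
              rw [hfs]
              omega
            rw [bCore_eq_some hv, bCore_eq_some htnn]
            have htoNat : (PySem.Chars.find (u ++ '\n' :: v) st).toNat
                = u.length + (1 + (PySem.Chars.find v st).toNat) := by
              rw [hfs]
              omega
            have htake : (u ++ '\n' :: v).take (PySem.Chars.find (u ++ '\n' :: v) st).toNat
                = u ++ '\n' :: v.take (PySem.Chars.find v st).toNat := by
              rw [htoNat, List.take_append, List.take_of_length_le (by omega)]
              congr 1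
              have harith : u.length + (1 + (PySem.Chars.find v st).toNat) - u.length
                  = (PySem.Chars.find v st).toNat + 1 := by omega
              rw [harith, List.take_succ_cons]
            rw [htake, rfind_append, Option.map_some]
            simp only [Option.some_inj, Prod.mk.injEq]
            constructor
            · rw [List.count_append, List.count_eq_zero.mpr hu, List.count_cons_self]
              omega
            · rw [hfs]
              split_ifs with hrf
              · rw [hrf]
                ring
              · ring
      · -- single line
        rw [lines1_no_nl hmem]
        by_cases hin : PySem.Chars.isIn st t = true
        · have hfind := isIn_iff_find_ne.mp hin
          have hnp : '\n' ∉ t.take (PySem.Chars.find t st).toNat :=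
            fun hmem' => hmem (List.mem_of_mem_take hmem')
          rw [bCore_eq_some hfind, List.count_eq_zero.mpr hnp, rfind_no_nl hnp]
          simp only [firstHit]
          rw [if_pos hin]
          simp only [Option.some_inj, Prod.mk.injEq]
          exact ⟨trivial, by ring⟩
        · have hfind : PySem.Chars.find t st = -1 := by
            by_contra hne
            exact hin (isIn_iff_find_ne.mpr hne)
          rw [bCore_eq_none hfind]
          simp only [firstHit]
          rw [if_neg hin]
          rfl
  exact H t.length t le_rfl

lemma firstHit_none {st : List Char} (lines : List (List Char))
    (h : ∀ l ∈ lines, PySem.Chars.isIn st l = false) : firstHit st lines = none := by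
  induction lines with
  | nil => rfl
  | cons l ls ih =>
    have hfalse := h l (List.mem_cons_self ..)
    simp only [firstHit]
    rw [if_neg (by rw [hfalse]; simp), ih (fun l' hl' => h l' (List.mem_cons_of_mem _ hl'))]
    rfl

lemma loopA_eq (st : List Char) (lines : List (List Char)) : ∀ (idx : Nat),
    loopA st lines idx =
      (firstHit st lines).map (fun p =>
        [("x", max 0 (50 + p.2 * 8)),
         ("y", max 0 (50 + ((idx + p.1 : Nat) : Int) * 15)),
         ("width", min ((st.length : Int) * 8) 500),
         ("height", (15 : Int))]) := by
  induction lines with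
  | nil => intro idx; rfl
  | cons l ls ih =>
    intro idx
    simp only [loopA, firstHit]
    by_cases h : PySem.Chars.isIn st l = true
    · simp [h]
    · rw [if_neg h, if_neg h, ih (idx + 1)]
      cases hfh : firstHit st ls with
      | none => simp
      | some p =>
        simp only [Option.map_some]
        have harith : idx + 1 + p.1 = idx + (p.1 + 1) := by omega
        rw [harith]

-- ===== VERDICT (by name: the statement is the Claim_ definition above) =====
theorem find_text_coordinates_spec : Claim_equal_find_text_coordinates := by
  intro page search_text hdom hpre
  show find_text_coordinates page search_text = find_text_coordinates_alt page search_text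
  simp only [find_text_coordinates, find_text_coordinates_alt]
  set st := PySem.Chars.strip search_text.toList with hst
  set T := (PySem.Dict.getD (PySem.Dict.ofList page) "text" "").toList with hT
  by_cases hlt : st.length < 3
  · rw [if_pos (by simp [hlt]), if_pos hlt]
  · have hne : (search_text == "") = false := by
      rw [Bool.eq_false_iff]
      intro h
      apply hlt
      rw [hst, eq_of_beq h]
      decide
    rw [if_neg (by simp [hne, hlt]), if_neg hlt]
    have hstne : st ≠ [] := fun h => hlt (by rw [h]; simp)
    rw [splitOn_eq_lines1, loopA_eq]
    by_cases hnl : '\n' ∈ st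
    · -- st spans lines: A finds no line, B takes the newline-guard branch
      have hBin : PySem.Chars.isIn ['\n'] st = true := by
        rw [PySem.Chars.isIn_iff_infix]
        obtain ⟨a, b, hab⟩ := List.append_of_mem hnl
        exact ⟨a, b, by rw [hab]; simp⟩
      have hnone : firstHit st (lines1 T) = none := by
        apply firstHit_none
        intro l hl
        rw [Bool.eq_false_iff]
        intro hin
        exact mem_lines1_no_nl hl (((PySem.Chars.isIn_iff_infix _ _).mp hin).subset hnl)
      rw [hnone, if_pos (by rw [hBin]; simp)]
      rfl
    · have hBin : PySem.Chars.isIn ['\n'] st = false := by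
        rw [Bool.eq_false_iff]
        intro hin
        exact hnl (((PySem.Chars.isIn_iff_infix _ _).mp hin).subset (by simp))
      rw [main_lemma hstne hnl]
      by_cases hfind : PySem.Chars.find T st = -1
      · rw [bCore_eq_none hfind, if_pos (by rw [hfind, hBin]; simp)]
        rfl
      · have hnn : 0 ≤ PySem.Chars.find T st := by
          have := PySem.Chars.neg_one_le_find T st
          omega
        rw [bCore_eq_some hfind, if_neg (by rw [hBin]; simp [hfind])]
        rw [PySem.List.slice_to _ hnn, count_single]
        simp only [Option.map_some]
        simp
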